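-- pv_equiv track=rewrite | github.com/DS-77/adversarial-maze-rl | src/metrics.py | triviality
-- ===== SOURCE A (Python) =====
-- def triviality(maze) -> int:
--     # Lower score indicate more triviality.
--     rows = len(maze)
--     cols = len(maze[0]) if rows > 0 else 0
--     branch_count = 0
--
--     for r in range(rows):
--         for c in range(cols):
--             if maze[r][c] == 1:
--                 neighbor_paths = 0
--                 # Check neighbours
--                 if r > 0 and maze[r - 1][c] == 1:
--                     neighbor_paths += 1
--                 if r < rows - 1 and maze[r + 1][c] == 1:
--                     neighbor_paths += 1
--                 if c > 0 and maze[r][c - 1] == 1: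
--                     neighbor_paths += 1
--                 if c < cols - 1 and maze[r][c + 1] == 1:
--                     neighbor_paths += 1
--
--                 if neighbor_paths == 3:
--                     branch_count += 1
--
--     return branch_count
-- ===== SOURCE B (Python) =====
-- def triviality(maze) -> int:
--     # Edge-based degree accumulation: one pass over horizontal adjacencies,
--     # one over vertical adjacencies, then count cells of degree 3.
--     rows = len(maze)
--     cols = len(maze[0]) if rows > 0 else 0
--     deg = [0] * (rows * cols)
--     for r in range(rows):
--         for c in range(cols - 1):
--             if maze[r][c] == 1 and maze[r][c + 1] == 1:
--                 deg[r * cols + c] += 1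
--                 deg[r * cols + c + 1] += 1
--     for r in range(rows - 1):
--         for c in range(cols):
--             if maze[r][c] == 1 and maze[r + 1][c] == 1:
--                 deg[r * cols + c] += 1
--                 deg[(r + 1) * cols + c] += 1
--     return sum(1 for d in deg if d == 3)
-- ===== Notes on version B (the rewrite author's own statement) =====
-- stated objective: alternative
-- what changed: Replaces the per-cell four-neighbor test with an edge-based degree accumulator: one pass over horizontal adjacencies and one over vertical adjacencies increments both endpoints' degrees in a flat grid, then a final scan counts degree-3 entries.
import Mathlib
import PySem

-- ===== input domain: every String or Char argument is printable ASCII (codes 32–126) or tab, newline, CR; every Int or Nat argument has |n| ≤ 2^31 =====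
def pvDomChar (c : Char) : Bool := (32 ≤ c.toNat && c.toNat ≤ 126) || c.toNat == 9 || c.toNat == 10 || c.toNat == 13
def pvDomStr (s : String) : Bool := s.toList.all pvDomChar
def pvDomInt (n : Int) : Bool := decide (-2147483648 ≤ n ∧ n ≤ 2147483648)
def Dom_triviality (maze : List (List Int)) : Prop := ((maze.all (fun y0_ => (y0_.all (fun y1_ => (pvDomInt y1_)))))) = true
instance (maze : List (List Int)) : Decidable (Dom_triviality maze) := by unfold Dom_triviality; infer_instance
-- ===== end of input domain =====

-- B replaces A's per-cell four-neighbor test with two passes over grid adjacencies that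
-- accumulate a flat degree array, then counts degree-3 entries; same cost, different algorithm.

-- maze[r][c]; under Pre_ every access either program makes is in range, so getD is exact.
def pvG (maze : List (List Int)) (r c : Nat) : Int := (maze.getD r []).getD c 0
-- cols = len(maze[0]) if rows > 0 else 0
def pvCols (maze : List (List Int)) : Nat := if 0 < maze.length then (maze.getD 0 []).length else 0

-- ===== PORT A =====
def triviality (maze : List (List Int)) : Int :=
  (List.range maze.length).foldl (fun acc r =>
    (List.range (pvCols maze)).foldl (fun acc c =>
      if pvG maze r c = 1 then
        if ((if 0 < r ∧ pvG maze (r-1) c = 1 then (1:Int) else 0) +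
            (if r < maze.length - 1 ∧ pvG maze (r+1) c = 1 then 1 else 0) +
            (if 0 < c ∧ pvG maze r (c-1) = 1 then 1 else 0) +
            (if c < pvCols maze - 1 ∧ pvG maze r (c+1) = 1 then 1 else 0)) = 3
        then acc + 1 else acc
      else acc) acc) 0

-- ===== PORT B =====
-- deg[i] += 1 (the index is always in range when B performs it)
def pvBump (d : List Int) (i : Nat) : List Int := d.set i (d.getD i 0 + 1)

def triviality_alt (maze : List (List Int)) : Int :=
  let deg0 : List Int := List.replicate (maze.length * pvCols maze) 0
  let deg1 := (List.range maze.length).foldl (fun d r =>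
    (List.range (pvCols maze - 1)).foldl (fun d c =>
      if pvG maze r c = 1 ∧ pvG maze r (c+1) = 1 then
        pvBump (pvBump d (r * pvCols maze + c)) (r * pvCols maze + c + 1)
      else d) d) deg0
  let deg2 := (List.range (maze.length - 1)).foldl (fun d r =>
    (List.range (pvCols maze)).foldl (fun d c =>
      if pvG maze r c = 1 ∧ pvG maze (r+1) c = 1 then
        pvBump (pvBump d (r * pvCols maze + c)) ((r+1) * pvCols maze + c)
      else d) d) deg1
  deg2.foldl (fun acc d => if d = 3 then acc + 1 else acc) 0

-- ===== PRECONDITION & SPEC =====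
-- Pre_ excludes exactly the ragged mazes on which Python A raises IndexError
-- (some row shorter than the first row); A returns on every other input.
def Pre_triviality (maze : List (List Int)) : Prop :=
  ∀ row ∈ maze, (maze.headD []).length ≤ row.length
instance (maze : List (List Int)) : Decidable (Pre_triviality maze) := by
  unfold Pre_triviality; infer_instance
def pvWitness_triviality : List (List Int) := [[1, 1, 1], [0, 1, 0]]
def Spec_triviality (maze : List (List Int)) (out : Int) : Prop := out = triviality_alt maze
instance (maze : List (List Int)) (out : Int) : Decidable (Spec_triviality maze out) := by unfold Spec_triviality; infer_instance

-- ===== CLAIM (what is proved, stated in full; the proofs are below) =====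
def Claim_equal_triviality : Prop := ∀ (maze : List (List Int)), Dom_triviality maze → Pre_triviality maze → Spec_triviality maze (triviality maze)

-- ===== LEMMAS AND PROOFS =====

-- qualifying adjacency incidence lists, parametric in the cell accessor g and the width m
def pvEdH (g : Nat → Nat → Int) (m r c : Nat) : List Nat :=
  if g r c = 1 ∧ g r (c+1) = 1 then [r * m + c, r * m + c + 1] else []
def pvEdV (g : Nat → Nat → Int) (m r c : Nat) : List Nat :=
  if g r c = 1 ∧ g (r+1) c = 1 then [r * m + c, (r+1) * m + c] else []
def pvBLh (g : Nat → Nat → Int) (rows m : Nat) : List Nat :=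
  (List.range rows).flatMap (fun r => (List.range (m-1)).flatMap (pvEdH g m r))
def pvBLv (g : Nat → Nat → Int) (rows m : Nat) : List Nat :=
  (List.range (rows-1)).flatMap (fun r => (List.range m).flatMap (pvEdV g m r))
-- A's per-cell neighbour count and branch indicator
def pvNp (maze : List (List Int)) (r c : Nat) : Int :=
  (if 0 < r ∧ pvG maze (r-1) c = 1 then (1:Int) else 0) +
  (if r < maze.length - 1 ∧ pvG maze (r+1) c = 1 then 1 else 0) +
  (if 0 < c ∧ pvG maze r (c-1) = 1 then 1 else 0) +
  (if c < pvCols maze - 1 ∧ pvG maze r (c+1) = 1 then 1 else 0)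
def pvAInd (maze : List (List Int)) (r c : Nat) : Int :=
  if pvG maze r c = 1 ∧ pvNp maze r c = 3 then 1 else 0

lemma pvBump_length (d : List Int) (i : Nat) : (pvBump d i).length = d.length := by
  simp [pvBump]

lemma pvBump_getD (d : List Int) (i j : Nat) :
    (pvBump d i).getD j 0 = if j = i ∧ j < d.length then d.getD j 0 + 1 else d.getD j 0 := by
  simp only [pvBump, List.getD, List.getElem?_set]
  split_ifs <;> simp_all <;> omega

lemma foldl_pvBump_length (bl : List Nat) (d : List Int) :
    (bl.foldl pvBump d).length = d.length := by
  induction bl generalizing d with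
  | nil => rfl
  | cons i bl ih => simp [List.foldl, ih, pvBump_length]

lemma foldl_pvBump_getD (bl : List Nat) (d : List Int) (j : Nat) :
    (bl.foldl pvBump d).getD j 0
      = d.getD j 0 + (if j < d.length then (bl.count j : Int) else 0) := by
  induction bl generalizing d with
  | nil => simp
  | cons i bl ih =>
      rw [List.foldl_cons, ih, pvBump_getD, pvBump_length]
      simp only [List.count_cons, beq_iff_eq]
      split_ifs <;> push_cast <;> omega

-- two bumps as a fold over the incidence list
lemma double_bump_eq (P : Prop) [Decidable P] (d : List Int) (a b : Nat) :
    (if P then pvBump (pvBump d a) b else d)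
      = (if P then [a, b] else []).foldl pvBump d := by
  split <;> simp [List.foldl]

lemma foldl_foldl_flatMap {α : Type} (f : α → List Nat) (L : List α) (d : List Int) :
    L.foldl (fun d x => (f x).foldl pvBump d) d = (L.flatMap f).foldl pvBump d := by
  induction L generalizing d with
  | nil => rfl
  | cons x L ih => simp [List.foldl, List.flatMap_cons, List.foldl_append, ih]

lemma count_flatMap {α : Type} (f : α → List Nat) (L : List α) (j : Nat) :
    (L.flatMap f).count j = (L.map (fun x => (f x).count j)).sum := by
  induction L with
  | nil => rfl
  | cons x L ih => simp [List.flatMap_cons, List.count_append, ih]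

lemma sum_map_add' {α : Type} (l : List α) (f g : α → Nat) :
    (l.map (fun x => f x + g x)).sum = (l.map f).sum + (l.map g).sum := by
  induction l with
  | nil => rfl
  | cons x l ih => simp [ih]; omega

-- sum of a point mask over a range
lemma sum_range_ite (n k : Nat) (v : Nat) :
    ((List.range n).map (fun i => if i = k then v else 0)).sum
      = if k < n then v else 0 := by
  induction n with
  | zero => simp
  | succ n ih =>
      rw [List.range_succ, List.map_append, List.sum_append, ih]
      simp only [List.map_cons, List.map_nil, List.sum_cons, List.sum_nil, add_zero]
      split_ifs <;> omega

-- flat-index injectivity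
lemma flat_idx_inj {m r1 c1 r2 c2 : Nat} (h1 : c1 < m) (h2 : c2 < m)
    (h : r1 * m + c1 = r2 * m + c2) : r1 = r2 ∧ c1 = c2 := by
  have hr : r1 = r2 := by
    rcases Nat.lt_trichotomy r1 r2 with hlt | heq | hgt
    · exfalso; have := Nat.succ_le_of_lt hlt; nlinarith
    · exact heq
    · exfalso; have := Nat.succ_le_of_lt hgt; nlinarith
  subst hr; omega

-- counts of one adjacency's incidence list at a fixed cell
lemma edH_count (g : Nat → Nat → Int) (m r c r' c' : Nat) (hc : c < m) (hc' : c' < m - 1) :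
    (pvEdH g m r' c').count (r * m + c)
      = (if r' = r ∧ c' = c then (if g r c = 1 ∧ g r (c+1) = 1 then 1 else 0) else 0)
        + (if r' = r ∧ c' + 1 = c then (if g r (c-1) = 1 ∧ g r c = 1 then 1 else 0) else 0) := by
  have hm : c' < m := by omega
  have hm1 : c' + 1 < m := by omega
  have e1 : (r' * m + c' = r * m + c) ↔ (r' = r ∧ c' = c) :=
    ⟨fun h => flat_idx_inj hm hc h, fun ⟨h1, h2⟩ => by rw [h1, h2]⟩
  have e2 : (r' * m + (c' + 1) = r * m + c) ↔ (r' = r ∧ c' + 1 = c) :=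
    ⟨fun h => flat_idx_inj hm1 hc h, fun ⟨h1, h2⟩ => by rw [h1, h2]⟩
  unfold pvEdH
  by_cases hcond : g r' c' = 1 ∧ g r' (c'+1) = 1
  · rw [if_pos hcond]
    have ha : r' * m + c' + 1 = r' * m + (c' + 1) := by omega
    simp only [List.count_cons, List.count_nil, beq_iff_eq, ha, e1, e2]
    by_cases h1 : r' = r ∧ c' = c
    · obtain ⟨rfl, rfl⟩ := h1
      simp [hcond.1, hcond.2]
    · by_cases h2 : r' = r ∧ c' + 1 = c
      · obtain ⟨rfl, hc2⟩ := h2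
        simp [h1, ← hc2, Nat.add_sub_cancel, hcond.1, hcond.2]
      · simp [h1, h2]
  · rw [if_neg hcond]
    simp only [List.count_nil]
    by_cases h1 : r' = r ∧ c' = c
    · obtain ⟨rfl, rfl⟩ := h1
      simp [hcond]
    · by_cases h2 : r' = r ∧ c' + 1 = c
      · obtain ⟨rfl, hc2⟩ := h2
        simp [h1, ← hc2, Nat.add_sub_cancel, hcond]
      · simp [h1, h2]

lemma edV_count (g : Nat → Nat → Int) (m r c r' c' : Nat) (hc : c < m) (hc' : c' < m) :
    (pvEdV g m r' c').count (r * m + c)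
      = (if r' = r ∧ c' = c then (if g r c = 1 ∧ g (r+1) c = 1 then 1 else 0) else 0)
        + (if r' + 1 = r ∧ c' = c then (if g (r-1) c = 1 ∧ g r c = 1 then 1 else 0) else 0) := by
  have e1 : (r' * m + c' = r * m + c) ↔ (r' = r ∧ c' = c) :=
    ⟨fun h => flat_idx_inj hc' hc h, fun ⟨h1, h2⟩ => by rw [h1, h2]⟩
  have e2 : ((r' + 1) * m + c' = r * m + c) ↔ (r' + 1 = r ∧ c' = c) :=
    ⟨fun h => flat_idx_inj hc' hc h, fun ⟨h1, h2⟩ => by rw [h1, h2]⟩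
  unfold pvEdV
  by_cases hcond : g r' c' = 1 ∧ g (r'+1) c' = 1
  · rw [if_pos hcond]
    simp only [List.count_cons, List.count_nil, beq_iff_eq, e1, e2]
    by_cases h1 : r' = r ∧ c' = c
    · obtain ⟨rfl, rfl⟩ := h1
      simp [hcond.1, hcond.2]
    · by_cases h2 : r' + 1 = r ∧ c' = c
      · obtain ⟨hr2, rfl⟩ := h2
        simp [h1, ← hr2, Nat.add_sub_cancel, hcond.1, hcond.2]
      · simp [h1, h2]
  · rw [if_neg hcond]
    simp only [List.count_nil]
    by_cases h1 : r' = r ∧ c' = c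
    · obtain ⟨rfl, rfl⟩ := h1
      simp [hcond]
    · by_cases h2 : r' + 1 = r ∧ c' = c
      · obtain ⟨hr2, rfl⟩ := h2
        simp [h1, ← hr2, Nat.add_sub_cancel, hcond]
      · simp [h1, h2]

lemma count_BLh (g : Nat → Nat → Int) (rows m r c : Nat) (hr : r < rows) (hc : c < m) :
    (pvBLh g rows m).count (r * m + c)
      = (if c < m - 1 ∧ g r c = 1 ∧ g r (c+1) = 1 then 1 else 0)
        + (if 0 < c ∧ g r (c-1) = 1 ∧ g r c = 1 then 1 else 0) := by
  unfold pvBLh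
  rw [count_flatMap]
  have hinner : ∀ r', ((List.range (m-1)).flatMap (pvEdH g m r')).count (r * m + c)
      = if r' = r then ((if c < m - 1 ∧ g r c = 1 ∧ g r (c+1) = 1 then 1 else 0)
          + (if 0 < c ∧ g r (c-1) = 1 ∧ g r c = 1 then 1 else 0)) else 0 := by
    intro r'
    rw [count_flatMap,
      List.map_congr_left (fun c' hc' => edH_count g m r c r' c' hc (List.mem_range.mp hc')),
      sum_map_add']
    by_cases hr' : r' = r
    · subst hr'
      simp only [true_and]
      rw [sum_range_ite]
      have hmask : ∀ c' ∈ List.range (m-1),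
          (if c' + 1 = c then (if g r' (c-1) = 1 ∧ g r' c = 1 then 1 else 0) else 0)
            = if c' = c - 1 then (if 0 < c then (if g r' (c-1) = 1 ∧ g r' c = 1 then 1 else 0) else 0) else 0 := by
        intro c' _
        split_ifs <;> omega
      rw [List.map_congr_left hmask, sum_range_ite]
      split_ifs <;> omega
    · simp [hr']
  rw [List.map_congr_left (fun r' _ => hinner r'), sum_range_ite, if_pos hr]

lemma count_BLv (g : Nat → Nat → Int) (rows m r c : Nat) (hr : r < rows) (hc : c < m) :
    (pvBLv g rows m).count (r * m + c)
      = (if r < rows - 1 ∧ g r c = 1 ∧ g (r+1) c = 1 then 1 else 0)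
        + (if 0 < r ∧ g (r-1) c = 1 ∧ g r c = 1 then 1 else 0) := by
  unfold pvBLv
  rw [count_flatMap]
  have hinner : ∀ r', ((List.range m).flatMap (pvEdV g m r')).count (r * m + c)
      = (if r' = r then (if g r c = 1 ∧ g (r+1) c = 1 then 1 else 0) else 0)
        + (if r' = r - 1 then (if 0 < r then (if g (r-1) c = 1 ∧ g r c = 1 then 1 else 0) else 0) else 0) := by
    intro r'
    rw [count_flatMap,
      List.map_congr_left (fun c' hc' => edV_count g m r c r' c' hc (List.mem_range.mp hc')),
      sum_map_add']
    have hm1 : ∀ c' ∈ List.range m,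
        (if r' = r ∧ c' = c then (if g r c = 1 ∧ g (r+1) c = 1 then 1 else 0) else 0)
          = if c' = c then (if r' = r then (if g r c = 1 ∧ g (r+1) c = 1 then 1 else 0) else 0) else 0 := by
      intro c' _; split_ifs <;> omega
    have hm2 : ∀ c' ∈ List.range m,
        (if r' + 1 = r ∧ c' = c then (if g (r-1) c = 1 ∧ g r c = 1 then 1 else 0) else 0)
          = if c' = c then (if r' = r - 1 then (if 0 < r then (if g (r-1) c = 1 ∧ g r c = 1 then 1 else 0) else 0) else 0) else 0 := by
      intro c' _; split_ifs <;> omega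
    rw [List.map_congr_left hm1, List.map_congr_left hm2, sum_range_ite, sum_range_ite,
      if_pos hc, if_pos hc]
  rw [List.map_congr_left (fun r' _ => hinner r'), sum_map_add', sum_range_ite, sum_range_ite]
  split_ifs <;> omega

-- generic fold helpers
lemma foldl_add_map {α : Type} (l : List α) (f : α → Int) (a : Int) :
    l.foldl (fun acc x => acc + f x) a = a + (l.map f).sum := by
  induction l generalizing a with
  | nil => simp
  | cons x l ih => simp [List.foldl, ih]; ring

lemma ite_count (P Q : Prop) [Decidable P] [Decidable Q] (acc : Int) :
    (if P then (if Q then acc + 1 else acc) else acc) = acc + (if P ∧ Q then 1 else 0) := by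
  split_ifs <;> simp_all

lemma ite_count' (d : Int) (acc : Int) :
    (if d = 3 then acc + 1 else acc) = acc + (if d = 3 then 1 else 0) := by
  split_ifs <;> simp

lemma self_eq_map_range (l : List Int) :
    l = (List.range l.length).map (fun j => l.getD j 0) := by
  apply List.ext_getElem
  · simp
  · intro i h1 h2
    simp [List.getD_eq_getElem?_getD, List.getElem?_eq_getElem h1]

-- splitting a range over a product
lemma sum_range_mul (n m : Nat) (h : Nat → Int) :
    ((List.range (n * m)).map h).sum
      = ((List.range n).map (fun r => ((List.range m).map (fun c => h (r * m + c))).sum)).sum := by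
  induction n with
  | zero => simp
  | succ n ih =>
      rw [Nat.succ_mul, List.range_add, List.map_append, List.sum_append, ih, List.range_succ,
        List.map_append, List.sum_append]
      simp [List.map_map, Function.comp_def]

-- A as a double sum of per-cell indicators
lemma A_as_sum (maze : List (List Int)) :
    triviality maze
      = ((List.range maze.length).map (fun r =>
          ((List.range (pvCols maze)).map (fun c => pvAInd maze r c)).sum)).sum := by
  unfold triviality
  have hb : ∀ (acc : Int) (r c : Nat),
      (if pvG maze r c = 1 then
        if ((if 0 < r ∧ pvG maze (r-1) c = 1 then (1:Int) else 0) +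
            (if r < maze.length - 1 ∧ pvG maze (r+1) c = 1 then 1 else 0) +
            (if 0 < c ∧ pvG maze r (c-1) = 1 then 1 else 0) +
            (if c < pvCols maze - 1 ∧ pvG maze r (c+1) = 1 then 1 else 0)) = 3
        then acc + 1 else acc
      else acc) = acc + pvAInd maze r c := by
    intro acc r c
    rw [ite_count]
    rfl
  simp only [hb, foldl_add_map]
  simp

-- B as the fold of all incidence bumps followed by the degree-3 count
lemma B_as_count (maze : List (List Int)) :
    triviality_alt maze
      = (((pvBLh (pvG maze) maze.length (pvCols maze)
            ++ pvBLv (pvG maze) maze.length (pvCols maze)).foldl pvBump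
            (List.replicate (maze.length * pvCols maze) 0)).map
          (fun d => if d = 3 then (1:Int) else 0)).sum := by
  unfold triviality_alt
  simp only [double_bump_eq]
  have hH : ∀ (r : Nat) (d : List Int),
      (List.range (pvCols maze - 1)).foldl (fun d c =>
        (if pvG maze r c = 1 ∧ pvG maze r (c+1) = 1 then
          [r * pvCols maze + c, r * pvCols maze + c + 1] else []).foldl pvBump d) d
        = ((List.range (pvCols maze - 1)).flatMap (pvEdH (pvG maze) (pvCols maze) r)).foldl pvBump d := by
    intro r d
    rw [← foldl_foldl_flatMap]
    rfl
  have hV : ∀ (r : Nat) (d : List Int),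
      (List.range (pvCols maze)).foldl (fun d c =>
        (if pvG maze r c = 1 ∧ pvG maze (r+1) c = 1 then
          [r * pvCols maze + c, (r+1) * pvCols maze + c] else []).foldl pvBump d) d
        = ((List.range (pvCols maze)).flatMap (pvEdV (pvG maze) (pvCols maze) r)).foldl pvBump d := by
    intro r d
    rw [← foldl_foldl_flatMap]
    rfl
  simp only [hH, hV, foldl_foldl_flatMap]
  rw [← List.foldl_append]
  simp only [ite_count', foldl_add_map]
  simp [pvBLh, pvBLv]

-- the per-cell agreement of the two counts
lemma cell_eq (maze : List (List Int)) (r c : Nat)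
    (hr : r < maze.length) (hc : c < pvCols maze) :
    (if (((pvBLh (pvG maze) maze.length (pvCols maze)
          ++ pvBLv (pvG maze) maze.length (pvCols maze)).count (r * pvCols maze + c) : Int) = 3)
      then (1:Int) else 0) = pvAInd maze r c := by
  rw [List.count_append, count_BLh _ _ _ _ _ hr hc, count_BLv _ _ _ _ _ hr hc]
  unfold pvAInd pvNp
  by_cases hg : pvG maze r c = 1
  · simp only [hg, true_and, and_true]
    split_ifs <;> simp_all
  · simp [hg]

-- main equivalence
lemma main_eq (maze : List (List Int)) : triviality maze = triviality_alt maze := by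
  rw [A_as_sum, B_as_count]
  have hlen : ((pvBLh (pvG maze) maze.length (pvCols maze)
      ++ pvBLv (pvG maze) maze.length (pvCols maze)).foldl pvBump
      (List.replicate (maze.length * pvCols maze) 0)).length = maze.length * pvCols maze := by
    rw [foldl_pvBump_length, List.length_replicate]
  rw [self_eq_map_range ((pvBLh (pvG maze) maze.length (pvCols maze)
      ++ pvBLv (pvG maze) maze.length (pvCols maze)).foldl pvBump
      (List.replicate (maze.length * pvCols maze) 0)), List.map_map, hlen]
  have hget : ∀ j ∈ List.range (maze.length * pvCols maze),
      ((fun d => if d = 3 then (1:Int) else 0) ∘ fun j =>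
        ((pvBLh (pvG maze) maze.length (pvCols maze)
          ++ pvBLv (pvG maze) maze.length (pvCols maze)).foldl pvBump
          (List.replicate (maze.length * pvCols maze) 0)).getD j 0) j
        = if (((pvBLh (pvG maze) maze.length (pvCols maze)
            ++ pvBLv (pvG maze) maze.length (pvCols maze)).count j : Int) = 3)
          then (1:Int) else 0 := by
    intro j hj
    have hj' : j < maze.length * pvCols maze := List.mem_range.mp hj
    have hv : ((pvBLh (pvG maze) maze.length (pvCols maze)
        ++ pvBLv (pvG maze) maze.length (pvCols maze)).foldl pvBump
        (List.replicate (maze.length * pvCols maze) 0)).getD j 0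
        = (((pvBLh (pvG maze) maze.length (pvCols maze)
            ++ pvBLv (pvG maze) maze.length (pvCols maze)).count j : Int)) := by
      rw [foldl_pvBump_getD]
      simp [List.length_replicate, hj', List.getD_replicate]
    simp only [Function.comp, hv]
  rw [List.map_congr_left hget, sum_range_mul]
  refine congrArg List.sum (List.map_congr_left fun r hr => ?_)
  refine congrArg List.sum (List.map_congr_left fun c hc => ?_)
  exact (cell_eq maze r c (List.mem_range.mp hr) (List.mem_range.mp hc)).symm

-- ===== VERDICT (by name: the statement is the Claim_ definition above) =====
theorem triviality_spec : Claim_equal_triviality := by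
  intro maze _ _
  unfold Spec_triviality
  exact main_eq maze
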